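-- pv_equiv track=rewrite | github.com/lane-neuro/research-analytics-suite | research_analytics_suite/hardware_manager/interface/network/Ethernet.py | _parse_darwin_output
-- ===== SOURCE A (Python) =====
-- from typing import List, Dict
--
-- def _parse_darwin_output(output: str) -> List[Dict[str, str]]:
--     devices = []
--     lines = output.split('\n')
--     current_device = None
--     for line in lines:
--         if 'Hardware Port' in line and 'Ethernet' in line:
--             if current_device:
--                 devices.append(current_device)
--             current_device = {'description': 'Ethernet Interface'}
--         if 'Device' in line and current_device is not None:
--             current_device['interface'] = line.split()[-1]
--     if current_device:
--         devices.append(current_device)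
--     return devices
-- ===== SOURCE B (Python) =====
-- def _is_header(line):
--     return 'Hardware Port' in line and 'Ethernet' in line
--
--
-- def _parse_darwin_output(output):
--     # Phase 1: partition the lines into segments, each starting at a header line.
--     segments = []
--     for line in output.split('\n'):
--         if _is_header(line):
--             segments.append([line])
--         elif segments:
--             segments[-1].append(line)
--     # Phase 2: turn each segment into a device dict (last 'Device' line wins).
--     devices = []
--     for seg in segments:
--         device = {'description': 'Ethernet Interface'}
--         for line in seg:
--             if 'Device' in line:
--                 device['interface'] = line.split()[-1]
--         devices.append(device)
--     return devices
-- ===== Notes on version B (the rewrite author's own statement) =====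
-- stated objective: alternative
-- what changed: A is a single-pass state machine carrying an optional current device; B first partitions the lines into header-delimited segments and then maps each segment to its device dict in a second pass.
import Mathlib
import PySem

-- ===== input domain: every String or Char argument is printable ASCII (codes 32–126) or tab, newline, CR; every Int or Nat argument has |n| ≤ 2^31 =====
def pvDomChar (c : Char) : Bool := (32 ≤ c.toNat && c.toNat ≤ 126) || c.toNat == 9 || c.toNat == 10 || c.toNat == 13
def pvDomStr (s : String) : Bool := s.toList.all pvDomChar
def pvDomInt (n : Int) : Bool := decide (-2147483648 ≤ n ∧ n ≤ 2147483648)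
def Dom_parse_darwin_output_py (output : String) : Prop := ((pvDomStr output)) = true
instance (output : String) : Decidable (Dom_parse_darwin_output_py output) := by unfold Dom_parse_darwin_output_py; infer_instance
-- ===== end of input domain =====

-- B replaces A's single-pass optional-current-device state machine by a two-phase
-- partition-into-segments-then-map decomposition (same cost; objective: alternative).


-- ===== PORT A =====
-- shared tiny helpers: the tests A's and B's Python both perform on a line
def pvIsHdr (line : String) : Bool :=
  PySem.Str.isIn "Hardware Port" line && PySem.Str.isIn "Ethernet" line

def pvHasDev (line : String) : Bool := PySem.Str.isIn "Device" line

-- line.split()[-1]; whenever pvHasDev line, split₀ is nonempty, so the default is never used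
def pvLastWord (line : String) : String :=
  (PySem.List.pyGet? (PySem.Str.split₀ line) (-1)).getD ""

-- output.split('\n'); the separator is the nonempty literal "\n", so split? is never none
def pvLines (output : String) : List String :=
  (PySem.Str.split? output "\n").getD []

def parse_darwin_output_py (output : String) : List (List (String × String)) :=
  let lines := pvLines output
  let s := lines.foldl
    (fun (s : List (PySem.Dict String String) × Option (PySem.Dict String String)) line =>
      let s :=
        if pvIsHdr line then
          ((match s.2 with | some d => s.1 ++ [d] | none => s.1),
           some ((PySem.Dict.empty).insert "description" "Ethernet Interface"))
        else s
      if pvHasDev line then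
        match s.2 with
        | some d => (s.1, some (d.insert "interface" (pvLastWord line)))
        | none => s
      else s)
    ([], none)
  (match s.2 with | some d => s.1 ++ [d] | none => s.1).map PySem.Dict.items

-- ===== PORT B =====
-- phase 1 step: a header starts a new segment, otherwise append to the last segment if any
def pvSegStep (segs : List (List String)) (line : String) : List (List String) :=
  if pvIsHdr line then segs ++ [[line]]
  else
    match segs.getLast? with
    | none => segs
    | some last => segs.dropLast ++ [last ++ [line]]

-- phase 2: one segment -> its device dict
def pvProcSeg (seg : List String) : PySem.Dict String String :=
  seg.foldl
    (fun d line => if pvHasDev line then d.insert "interface" (pvLastWord line) else d)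
    ((PySem.Dict.empty).insert "description" "Ethernet Interface")

def parse_darwin_output_py_alt (output : String) : List (List (String × String)) :=
  let segments := (pvLines output).foldl pvSegStep []
  (segments.foldl (fun devs seg => devs ++ [pvProcSeg seg]) []).map PySem.Dict.items

-- ===== PRECONDITION & SPEC =====
def Spec_parse_darwin_output_py (output : String) (out : List (List (String × String))) : Prop := out = parse_darwin_output_py_alt output
instance (output : String) (out : List (List (String × String))) : Decidable (Spec_parse_darwin_output_py output out) := by unfold Spec_parse_darwin_output_py; infer_instance

-- ===== CLAIM (what is proved, stated in full; the proofs are below) =====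
def Claim_equal_parse_darwin_output_py : Prop := ∀ (output : String), Dom_parse_darwin_output_py output → Spec_parse_darwin_output_py output (parse_darwin_output_py output)

-- ===== LEMMAS AND PROOFS =====
-- A's loop body, named for the proof (definitionally the lambda in parse_darwin_output_py)
def pvStepA (s : List (PySem.Dict String String) × Option (PySem.Dict String String))
    (line : String) : List (PySem.Dict String String) × Option (PySem.Dict String String) :=
  let s :=
    if pvIsHdr line then
      ((match s.2 with | some d => s.1 ++ [d] | none => s.1),
       some ((PySem.Dict.empty).insert "description" "Ethernet Interface"))
    else s
  if pvHasDev line then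
    match s.2 with
    | some d => (s.1, some (d.insert "interface" (pvLastWord line)))
    | none => s
  else s

-- A's final flush, named for the proof
def pvFinA (s : List (PySem.Dict String String) × Option (PySem.Dict String String)) :
    List (PySem.Dict String String) :=
  match s.2 with | some d => s.1 ++ [d] | none => s.1

lemma pvProcSeg_append (seg : List String) (line : String) :
    pvProcSeg (seg ++ [line]) =
      (if pvHasDev line then (pvProcSeg seg).insert "interface" (pvLastWord line)
       else pvProcSeg seg) := by
  simp [pvProcSeg, List.foldl_append]

-- the loop invariant: A's state is determined by B's segment list
lemma pvKey : ∀ (lines : List String) (segs : List (List String))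
    (devs : List (PySem.Dict String String)) (cur : Option (PySem.Dict String String)),
    devs = segs.dropLast.map pvProcSeg →
    cur = segs.getLast?.map pvProcSeg →
    pvFinA (lines.foldl pvStepA (devs, cur)) = (lines.foldl pvSegStep segs).map pvProcSeg := by
  intro lines
  induction lines with
  | nil =>
    intro segs devs cur hd hc
    rcases segs.eq_nil_or_concat with rfl | ⟨S, s, rfl⟩
    · simp at hd hc; simp [hd, hc, pvFinA]
    · simp at hd hc
      simp [hd, hc, pvFinA, List.concat_eq_append]
  | cons line rest ih =>
    intro segs devs cur hd hc
    simp only [List.foldl_cons]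
    rcases segs.eq_nil_or_concat with rfl | ⟨S, s, rfl⟩
    · -- no segment yet: cur is none
      simp at hd hc; subst hd; subst hc
      by_cases h : pvIsHdr line
      · have hst : pvStepA ([], none) line = ([], some (pvProcSeg [line])) := by
          by_cases hdev : pvHasDev line <;> simp [pvStepA, h, hdev, pvProcSeg]
        rw [hst, ih [[line]] [] (some (pvProcSeg [line])) (by simp) (by simp)]
        simp [pvSegStep, h]
      · have hst : pvStepA ([], none) line = ([], none) := by
          by_cases hdev : pvHasDev line <;> simp [pvStepA, h, hdev]
        rw [hst, ih [] [] none (by simp) (by simp)]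
        simp [pvSegStep, h]
    · -- there is a last segment s; cur is its device
      simp only [List.concat_eq_append] at hd hc ⊢
      simp at hd hc; subst hd; subst hc
      by_cases h : pvIsHdr line
      · -- A flushes the current device and starts a new one; B opens segment [line]
        have hstep : pvStepA (S.map pvProcSeg, some (pvProcSeg s)) line =
            (S.map pvProcSeg ++ [pvProcSeg s], some (pvProcSeg [line])) := by
          by_cases hdev : pvHasDev line <;> simp [pvStepA, h, hdev, pvProcSeg]
        have hseg : pvSegStep (S ++ [s]) line = (S ++ [s]) ++ [[line]] := by
          simp [pvSegStep, h]
        rw [hstep, hseg, ih ((S ++ [s]) ++ [[line]]) _ _ (by simp) (by simp)]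
      · -- the line joins the last segment
        have hstep : pvStepA (S.map pvProcSeg, some (pvProcSeg s)) line =
            (S.map pvProcSeg, some (pvProcSeg (s ++ [line]))) := by
          rw [show pvProcSeg (s ++ [line]) = (if pvHasDev line then
                (pvProcSeg s).insert "interface" (pvLastWord line) else pvProcSeg s)
              from pvProcSeg_append s line]
          by_cases hdev : pvHasDev line <;> simp [pvStepA, h, hdev]
        have hseg : pvSegStep (S ++ [s]) line = S ++ [s ++ [line]] := by
          simp [pvSegStep, h]
        rw [hstep, hseg, ih (S ++ [s ++ [line]]) _ _ (by simp) (by simp)]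

lemma pvA_eq (output : String) :
    parse_darwin_output_py output =
      (((pvLines output).foldl pvSegStep []).map pvProcSeg).map
        PySem.Dict.items := by
  show (pvFinA ((pvLines output).foldl pvStepA ([], none))).map
      PySem.Dict.items = _
  rw [pvKey _ [] [] none (by simp) (by simp)]

lemma pvB_eq (output : String) :
    parse_darwin_output_py_alt output =
      (((pvLines output).foldl pvSegStep []).map pvProcSeg).map
        PySem.Dict.items := by
  show (((pvLines output).foldl pvSegStep []).foldl
      (fun devs seg => devs ++ [pvProcSeg seg]) []).map PySem.Dict.items = _
  rw [PySem.List.foldl_append_singleton_eq_map]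
  simp

-- ===== VERDICT (by name: the statement is the Claim_ definition above) =====
theorem parse_darwin_output_py_spec : Claim_equal_parse_darwin_output_py := by
  intro output _
  unfold Spec_parse_darwin_output_py
  rw [pvA_eq, pvB_eq]
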